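-- pv_equiv track=rewrite | github.com/krbrink/PhoPQ_hAMP_sort-seq | propy_functions.py | calculate_charge
-- ===== SOURCE A (Python) =====
-- aa_charge = {'D': -1, 'E': -1, 'K': 1, 'R': 1}
--
-- def calculate_charge(peptide):
-- 	total_charge = 0
-- 	for aa in peptide:
-- 		try:
-- 			total_charge += aa_charge[aa]
-- 		except:
-- 			continue
-- 	return total_charge
-- ===== SOURCE B (Python) =====
-- def calculate_charge(peptide):
-- 	return (peptide.count('K') + peptide.count('R')) - (peptide.count('D') + peptide.count('E'))
-- ===== Notes on version B (the rewrite author's own statement) =====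
-- stated objective: simpler
-- what changed: Replaces the accumulating per-character loop with dict lookups and try/except by a closed-form difference of four str.count scans.
import Mathlib
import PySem

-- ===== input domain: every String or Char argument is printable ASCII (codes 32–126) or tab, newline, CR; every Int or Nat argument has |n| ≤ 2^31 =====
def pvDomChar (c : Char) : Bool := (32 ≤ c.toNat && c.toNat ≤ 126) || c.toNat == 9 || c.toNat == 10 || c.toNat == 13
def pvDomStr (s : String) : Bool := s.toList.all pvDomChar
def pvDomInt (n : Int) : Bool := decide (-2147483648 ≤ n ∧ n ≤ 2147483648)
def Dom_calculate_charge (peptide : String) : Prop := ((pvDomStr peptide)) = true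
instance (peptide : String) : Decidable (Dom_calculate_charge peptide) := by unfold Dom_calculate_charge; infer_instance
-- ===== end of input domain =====

-- B replaces A's accumulating loop (dict lookup per residue, try/except) by a closed-form
-- difference of four whole-string count scans; same value for every string.

-- ===== PORT A =====
def aa_charge : PySem.Dict Char Int :=
  PySem.Dict.ofList [('D', -1), ('E', -1), ('K', 1), ('R', 1)]

-- 'total_charge += aa_charge[aa]' inside try/except: a missing key (KeyError) is 'continue'
def calculate_charge (peptide : String) : Int :=
  peptide.toList.foldl
    (fun total_charge aa =>
      match aa_charge.get? aa with
      | some v => total_charge + v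
      | none => total_charge)
    0

-- ===== PORT B =====
def calculate_charge_alt (peptide : String) : Int :=
  ((PySem.Str.count peptide "K" : Int) + (PySem.Str.count peptide "R" : Int))
    - ((PySem.Str.count peptide "D" : Int) + (PySem.Str.count peptide "E" : Int))

-- ===== PRECONDITION & SPEC =====
def Spec_calculate_charge (peptide : String) (out : Int) : Prop := out = calculate_charge_alt peptide
instance (peptide : String) (out : Int) : Decidable (Spec_calculate_charge peptide out) := by unfold Spec_calculate_charge; infer_instance

-- ===== CLAIM (what is proved, stated in full; the proofs are below) =====
def Claim_equal_calculate_charge : Prop := ∀ (peptide : String), Dom_calculate_charge peptide → Spec_calculate_charge peptide (calculate_charge peptide)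

-- ===== LEMMAS AND PROOFS =====

-- Python's s.count for a single-character needle is the plain character count.
theorem chars_count_go_singleton (c : Char) (l : List Char) (fuel : Nat) (acc : Nat)
    (h : l.length ≤ fuel) :
    PySem.Chars.count.go [c] fuel l acc = acc + l.count c := by
  induction l generalizing fuel acc with
  | nil => cases fuel <;> simp [PySem.Chars.count.go]
  | cons x t ih =>
    cases fuel with
    | zero => simp at h
    | succ n =>
      have hn : t.length ≤ n := by simpa using h
      by_cases hx : x = c
      · subst hx
        simp [PySem.Chars.count.go, List.isPrefixOf, ih _ _ hn]
        omega
      · have : ([c].isPrefixOf (x :: t)) = false := by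
          simp [List.isPrefixOf]; exact fun h' => hx h'.symm
        simp [PySem.Chars.count.go, this, hx, ih _ _ hn]

theorem chars_count_singleton (c : Char) (l : List Char) :
    PySem.Chars.count l [c] = l.count c := by
  simpa [PySem.Chars.count] using chars_count_go_singleton c l l.length 0 le_rfl

theorem str_count_singleton (s : String) (c : Char) :
    PySem.Str.count s (String.ofList [c]) = s.toList.count c := by
  rw [PySem.Str.count_eq]
  simpa using chars_count_singleton c s.toList

theorem foldl_charge (l : List Char) (a : Int) :
    l.foldl
      (fun total_charge aa =>
        match aa_charge.get? aa with
        | some v => total_charge + v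
        | none => total_charge) a
      = a + ((l.count 'K' : Int) + (l.count 'R' : Int))
          - ((l.count 'D' : Int) + (l.count 'E' : Int)) := by
  induction l generalizing a with
  | nil => simp
  | cons x t ih =>
    simp only [List.foldl_cons, ih, List.count_cons]
    by_cases hD : x = 'D'
    · subst hD
      have h : aa_charge.get? 'D' = some (-1) := by decide
      rw [h]; push_cast; simp; try ring
    by_cases hE : x = 'E'
    · subst hE
      have h : aa_charge.get? 'E' = some (-1) := by decide
      rw [h]; push_cast; simp; try ring
    by_cases hK : x = 'K'
    · subst hK
      have h : aa_charge.get? 'K' = some 1 := by decide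
      rw [h]; push_cast; simp; try ring
    by_cases hR : x = 'R'
    · subst hR
      have h : aa_charge.get? 'R' = some 1 := by decide
      rw [h]; push_cast; simp; try ring
    · have hmk : aa_charge = PySem.Dict.mk [('D', -1), ('E', -1), ('K', 1), ('R', 1)] := by decide
      have h : aa_charge.get? x = none := by
        have hD' : ¬('D' = x) := fun h' => hD h'.symm
        have hE' : ¬('E' = x) := fun h' => hE h'.symm
        have hK' : ¬('K' = x) := fun h' => hK h'.symm
        have hR' : ¬('R' = x) := fun h' => hR h'.symm
        rw [hmk]
        simp [PySem.Dict.get?, hD', hE', hK', hR']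
      simp [h, hD, hE, hK, hR]

-- ===== VERDICT (by name: the statement is the Claim_ definition above) =====
theorem calculate_charge_spec : Claim_equal_calculate_charge := by
  intro peptide _
  show calculate_charge peptide = calculate_charge_alt peptide
  unfold calculate_charge calculate_charge_alt
  have hK := str_count_singleton peptide 'K'
  have hR := str_count_singleton peptide 'R'
  have hD := str_count_singleton peptide 'D'
  have hE := str_count_singleton peptide 'E'
  simp only [show ("K" : String) = String.ofList ['K'] from rfl,
    show ("R" : String) = String.ofList ['R'] from rfl,
    show ("D" : String) = String.ofList ['D'] from rfl,
    show ("E" : String) = String.ofList ['E'] from rfl, hK, hR, hD, hE]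
  rw [foldl_charge]
  ring
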